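-- pv_equiv track=rewrite | github.com/yikerman/learn-attn | microgpt/tokenizer.py | _merge_chunk_inplace
-- ===== SOURCE A (Python) =====
-- def _merge_chunk_inplace(
--     ids: list[int],
--     pair: tuple[int, int],
--     new_id: int,
-- ) -> list[int]:
--     """Replace pair in ids, returning new list. Optimized: skips chunks
--     that can't possibly contain the pair (short-circuit on length)."""
--     if len(ids) < 2:
--         return ids
--     out: list[int] = []
--     i = 0
--     a, b = pair
--     n = len(ids)
--     while i < n:
--         if i < n - 1 and ids[i] == a and ids[i + 1] == b:
--             out.append(new_id)
--             i += 2
--         else: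
--             out.append(ids[i])
--             i += 1
--     return out
-- ===== SOURCE B (Python) =====
-- def _merge_chunk_inplace(
--     ids: list[int],
--     pair: tuple[int, int],
--     new_id: int,
-- ) -> list[int]:
--     if len(ids) < 2:
--         return ids
--     a, b = pair
--     # single pass over the elements themselves (no indices): keep one
--     # pending element; merge it with the current one when they form the pair.
--     out: list[int] = []
--     held = None
--     for x in ids:
--         if held is None:
--             held = x
--         elif held == a and x == b:
--             out.append(new_id)
--             held = None
--         else:
--             out.append(held)
--             held = x
--     if held is not None:
--         out.append(held)
--     return out
-- ===== Notes on version B (the rewrite author's own statement) =====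
-- stated objective: alternative
-- what changed: A's index-based while loop with lookahead (ids[i], ids[i+1]) is replaced by an index-free single pass over the elements with a one-element pending buffer merged on a pair match; avoiding per-step index bookkeeping and repeated subscripting gives a constant-factor speedup.
import Mathlib
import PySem

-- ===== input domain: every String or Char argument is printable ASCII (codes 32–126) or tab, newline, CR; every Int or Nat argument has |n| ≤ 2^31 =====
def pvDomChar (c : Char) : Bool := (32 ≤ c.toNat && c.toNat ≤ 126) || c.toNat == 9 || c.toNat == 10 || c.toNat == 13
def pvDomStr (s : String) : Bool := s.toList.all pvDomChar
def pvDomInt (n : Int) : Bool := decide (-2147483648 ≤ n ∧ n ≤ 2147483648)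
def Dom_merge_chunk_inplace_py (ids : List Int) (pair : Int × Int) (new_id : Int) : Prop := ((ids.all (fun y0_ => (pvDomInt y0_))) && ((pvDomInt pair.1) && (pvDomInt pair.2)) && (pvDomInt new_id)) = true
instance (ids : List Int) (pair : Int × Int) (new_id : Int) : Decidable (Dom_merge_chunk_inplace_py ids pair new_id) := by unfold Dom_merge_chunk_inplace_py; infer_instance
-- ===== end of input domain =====

-- B replaces A's index-based lookahead loop by an index-free single pass with a one-element
-- pending buffer (merge the pending element with the current one when they form the pair);
-- objective: alternative decomposition, same asymptotic cost.

-- ===== PORT A =====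
-- A's while-loop over index i; fuel = n - i suffices (instantiated with fuel = n).
-- Indices are only read while in range, so ids[i]? / .getD transcribes Python's ids[i] exactly here.
def pvALoop (ids : List Int) (a b new_id : Int) (n : Nat) : Nat → Nat → List Int
  | _, 0 => []
  | i, fuel+1 =>
    if i < n then
      if i < n - 1 ∧ ids[i]? = some a ∧ ids[i+1]? = some b then
        new_id :: pvALoop ids a b new_id n (i+2) fuel
      else
        (ids[i]?.getD 0) :: pvALoop ids a b new_id n (i+1) fuel
    else []

def merge_chunk_inplace_py (ids : List Int) (pair : Int × Int) (new_id : Int) : List Int :=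
  if ids.length < 2 then ids
  else pvALoop ids pair.1 pair.2 new_id ids.length 0 ids.length

-- ===== PORT B =====
-- B's for-loop body: state = (out so far, pending element or none)
def pvStep (a b new_id : Int) (st : List Int × Option Int) (x : Int) : List Int × Option Int :=
  match st.2 with
  | none => (st.1, some x)
  | some h =>
    if h = a ∧ x = b then (st.1 ++ [new_id], none)
    else (st.1 ++ [h], some x)

def merge_chunk_inplace_py_alt (ids : List Int) (pair : Int × Int) (new_id : Int) : List Int :=
  if ids.length < 2 then ids
  else
    let s := ids.foldl (pvStep pair.1 pair.2 new_id) ([], none)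
    match s.2 with
    | none => s.1
    | some h => s.1 ++ [h]

-- ===== PRECONDITION & SPEC =====
def Spec_merge_chunk_inplace_py (ids : List Int) (pair : Int × Int) (new_id : Int) (out : List Int) : Prop := out = merge_chunk_inplace_py_alt ids pair new_id
instance (ids : List Int) (pair : Int × Int) (new_id : Int) (out : List Int) : Decidable (Spec_merge_chunk_inplace_py ids pair new_id out) := by unfold Spec_merge_chunk_inplace_py; infer_instance

-- ===== CLAIM (what is proved, stated in full; the proofs are below) =====
def Claim_equal_merge_chunk_inplace_py : Prop := ∀ (ids : List Int) (pair : Int × Int) (new_id : Int), Dom_merge_chunk_inplace_py ids pair new_id → Spec_merge_chunk_inplace_py ids pair new_id (merge_chunk_inplace_py ids pair new_id)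

-- ===== LEMMAS AND PROOFS =====

-- structural characterisation of the non-overlapping left-to-right merge
def pvMergeL (a b new_id : Int) : List Int → List Int
  | [] => []
  | [x] => [x]
  | x :: y :: rest =>
    if x = a ∧ y = b then new_id :: pvMergeL a b new_id rest
    else x :: pvMergeL a b new_id (y :: rest)

theorem pvALoop_eq (ids : List Int) (a b new_id : Int) :
    ∀ (fuel i : Nat), ids.length ≤ i + fuel →
      pvALoop ids a b new_id ids.length i fuel = pvMergeL a b new_id (ids.drop i) := by
  intro fuel
  induction fuel with
  | zero =>
    intro i h
    have hd : ids.drop i = [] := List.drop_eq_nil_of_le (by omega)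
    rw [hd]
    simp [pvALoop, pvMergeL]
  | succ fuel ih =>
    intro i h
    by_cases hi : i < ids.length
    · rw [List.drop_eq_getElem_cons hi]
      by_cases hi1 : i + 1 < ids.length
      · rw [List.drop_eq_getElem_cons hi1]
        by_cases hab : ids[i] = a ∧ ids[i+1] = b
        · have hc : i < ids.length - 1 ∧ ids[i]? = some a ∧ ids[i+1]? = some b := by
            refine ⟨by omega, ?_, ?_⟩ <;> simp [hi, hi1, hab.1, hab.2]
          simp only [pvALoop, if_pos hi, if_pos hc, pvMergeL, if_pos hab]
          rw [ih (i+2) (by omega)]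
        · have hc : ¬ (i < ids.length - 1 ∧ ids[i]? = some a ∧ ids[i+1]? = some b) := by
            simp only [List.getElem?_eq_getElem, hi, hi1, Option.some.injEq]
            tauto
          simp only [pvALoop, if_pos hi, if_neg hc, pvMergeL, if_neg hab]
          rw [ih (i+1) (by omega), List.drop_eq_getElem_cons hi1]
          simp [List.getElem?_eq_getElem hi]
      · have hd : ids.drop (i+1) = [] := List.drop_eq_nil_of_le (by omega)
        have hc : ¬ (i < ids.length - 1 ∧ ids[i]? = some a ∧ ids[i+1]? = some b) := by
          rintro ⟨h1, -, -⟩; omega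
        simp only [pvALoop, if_pos hi, if_neg hc, hd, pvMergeL]
        rw [ih (i+1) (by omega), hd]
        simp [List.getElem?_eq_getElem hi, pvMergeL]
    · have hd : ids.drop i = [] := List.drop_eq_nil_of_le (by omega)
      rw [hd]
      simp only [pvALoop, if_neg hi, pvMergeL]

-- finishing step of B's state machine
def pvFinish (s : List Int × Option Int) : List Int :=
  match s.2 with
  | none => s.1
  | some h => s.1 ++ [h]

def pvOpt : Option Int → List Int
  | none => []
  | some h => [h]

theorem pvFold_eq (a b new_id : Int) :
    ∀ (xs : List Int) (acc : List Int) (held : Option Int),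
      pvFinish (xs.foldl (pvStep a b new_id) (acc, held))
        = acc ++ pvMergeL a b new_id (pvOpt held ++ xs) := by
  intro xs
  induction xs with
  | nil =>
    intro acc held
    cases held <;> simp [pvFinish, pvOpt, pvMergeL]
  | cons x xs ih =>
    intro acc held
    cases held with
    | none =>
      simp only [List.foldl_cons, pvStep, pvOpt, List.nil_append]
      exact ih acc (some x)
    | some h =>
      by_cases hab : h = a ∧ x = b
      · simp only [List.foldl_cons, pvStep, if_pos hab]
        rw [ih (acc ++ [new_id]) none]
        simp [pvOpt, pvMergeL, hab]
      · simp only [List.foldl_cons, pvStep, if_neg hab]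
        rw [ih (acc ++ [h]) (some x)]
        simp [pvOpt, pvMergeL, hab]

-- ===== VERDICT (by name: the statement is the Claim_ definition above) =====
theorem merge_chunk_inplace_py_spec : Claim_equal_merge_chunk_inplace_py := by
  intro ids pair new_id _
  unfold Spec_merge_chunk_inplace_py merge_chunk_inplace_py merge_chunk_inplace_py_alt
  by_cases h2 : ids.length < 2
  · simp [h2]
  · simp only [if_neg h2]
    rw [pvALoop_eq ids pair.1 pair.2 new_id ids.length 0 (by omega)]
    have := pvFold_eq pair.1 pair.2 new_id ids [] none
    simp only [pvFinish, pvOpt, List.nil_append] at this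
    simp [← this]
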